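-- pv_equiv track=rewrite | github.com/sanskarchand/python-projects | worldShifter/levelEditor/parser.py | sanitise
-- ===== SOURCE A (Python) =====
-- def sanitise(string):
--     """
--     sanitises level data
--     """
--     ns = ''
--     wspace = 0
--
--     for each in string:
--         if each != '\n' and each != ' ':
--             ns += each
--             wspace = 0
--
--         if each == '\n':
--             ns += ' '
--
--         if each == ' ' and wspace == 0:
--             ns += each
--             wspace = 1
--
--     liste = ns.split(' ')
--     liste = [each for each in liste if each != '']
--
--     return liste
-- ===== SOURCE B (Python) =====
-- def sanitise(string):
--     """
--     sanitises level data
--     """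
--     tokens = []
--     cur = []
--     for c in string:
--         if c == ' ' or c == '\n':
--             if cur:
--                 tokens.append(''.join(cur))
--                 cur = []
--         else:
--             cur.append(c)
--     if cur:
--         tokens.append(''.join(cur))
--     return tokens
-- ===== Notes on version B (the rewrite author's own statement) =====
-- stated objective: simpler
-- what changed: Replaced A's whitespace-flag string-rebuilding pass followed by a space-split and an empty-token filter with a single direct tokenizer loop that accumulates the current token and emits it at each separator character.
import Mathlib
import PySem

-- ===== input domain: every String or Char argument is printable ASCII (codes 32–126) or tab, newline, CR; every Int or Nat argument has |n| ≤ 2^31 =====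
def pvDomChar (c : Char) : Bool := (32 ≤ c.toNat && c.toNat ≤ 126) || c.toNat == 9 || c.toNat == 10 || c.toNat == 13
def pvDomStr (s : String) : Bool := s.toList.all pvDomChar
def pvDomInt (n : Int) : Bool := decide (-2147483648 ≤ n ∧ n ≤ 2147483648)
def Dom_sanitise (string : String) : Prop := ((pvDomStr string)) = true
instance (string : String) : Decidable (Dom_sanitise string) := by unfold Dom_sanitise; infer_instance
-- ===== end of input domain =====

-- B replaces A's flag-driven string rebuild + split + filter by one direct tokenizer loop (simpler decomposition, same O(n) cost).

-- ===== PORT A =====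
-- A's loop state: the rebuilt string ns and the wspace flag (a Python int).
def sanitiseStep (p : String × Int) (each : Char) : String × Int :=
  let p := if each ≠ '\n' ∧ each ≠ ' ' then (p.1.push each, (0 : Int)) else p
  let p := if each = '\n' then (p.1.push ' ', p.2) else p
  if each = ' ' ∧ p.2 = 0 then (p.1.push each, (1 : Int)) else p

def sanitise (string : String) : List String :=
  let st := string.toList.foldl sanitiseStep ("", 0)
  let liste := (PySem.Chars.splitOn st.1.toList [' ']).map String.ofList
  liste.filter (fun each => each ≠ "")

-- ===== PORT B =====
-- B's loop state: finished tokens and the chars of the current token.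
def sanitiseAltStep (p : List String × List Char) (c : Char) : List String × List Char :=
  if c = ' ' ∨ c = '\n' then
    (if p.2 ≠ [] then (p.1 ++ [String.ofList p.2], []) else p)
  else (p.1, p.2 ++ [c])

def sanitise_alt (string : String) : List String :=
  let st := string.toList.foldl sanitiseAltStep ([], [])
  if st.2 ≠ [] then st.1 ++ [String.ofList st.2] else st.1

-- ===== PRECONDITION & SPEC =====
def Spec_sanitise (string : String) (out : List String) : Prop := out = sanitise_alt string
instance (string : String) (out : List String) : Decidable (Spec_sanitise string out) := by unfold Spec_sanitise; infer_instance

-- ===== CLAIM (what is proved, stated in full; the proofs are below) =====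
def Claim_equal_sanitise : Prop := ∀ (string : String), Dom_sanitise string → Spec_sanitise string (sanitise string)

-- ===== LEMMAS AND PROOFS =====

-- tokens of a string as split(' ') produces them: the fields between spaces, empties kept
def toks : List Char → List (List Char)
  | [] => [[]]
  | c :: t =>
    if c = ' ' then [] :: toks t
    else match toks t with
      | [] => [[c]]
      | h :: r => (c :: h) :: r

theorem toks_ne_nil (l : List Char) : toks l ≠ [] := by
  cases l with
  | nil => simp [toks]
  | cons c t =>
    simp only [toks]
    split
    · simp
    · split
      · simp
      · simp

theorem go_spec (l : List Char) : ∀ (fuel : Nat) (cur : List Char) (acc : List (List Char)),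
    l.length ≤ fuel →
    PySem.Chars.splitOn.go [' '] fuel l cur acc =
      acc.reverse ++ ((cur.reverse ++ (toks l).headI) :: (toks l).tail) := by
  induction l with
  | nil =>
    intro fuel cur acc _
    cases fuel <;> simp [PySem.Chars.splitOn.go, toks]
  | cons c t ih =>
    intro fuel cur acc hf
    cases fuel with
    | zero => simp at hf
    | succ f =>
      by_cases hc : c = ' '
      · subst hc
        rw [show PySem.Chars.splitOn.go [' '] (f+1) (' ' :: t) cur acc
              = PySem.Chars.splitOn.go [' '] f t [] (cur.reverse :: acc) by
            simp [PySem.Chars.splitOn.go, List.isPrefixOf]]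
        rw [ih f [] (cur.reverse :: acc) (by simpa using hf)]
        simp only [toks, if_pos rfl]
        cases h : toks t with
        | nil => exact absurd h (toks_ne_nil t)
        | cons a r => simp
      · rw [show PySem.Chars.splitOn.go [' '] (f+1) (c :: t) cur acc
              = PySem.Chars.splitOn.go [' '] f t (c :: cur) acc by
            simp only [PySem.Chars.splitOn.go, List.isPrefixOf]
            split
            · next hif =>
                exfalso
                simp at hif
                exact hc hif.symm
            · rfl]
        rw [ih f (c :: cur) acc (by simpa using Nat.le_of_succ_le_succ hf)]
        simp only [toks, if_neg hc]
        cases h : toks t with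
        | nil => exact absurd h (toks_ne_nil t)
        | cons a r => simp

theorem splitOn_eq_toks (l : List Char) : PySem.Chars.splitOn l [' '] = toks l := by
  have h := go_spec l (l.length + 1) [] [] (by omega)
  rw [PySem.Chars.splitOn, h]
  cases hh : toks l with
  | nil => exact absurd hh (toks_ne_nil l)
  | cons a r => simp

theorem toks_snoc_space (l : List Char) : toks (l ++ [' ']) = toks l ++ [[]] := by
  induction l with
  | nil => simp [toks]
  | cons c t ih =>
    by_cases hc : c = ' '
    · subst hc; simp [toks, ih]
    · simp only [List.cons_append, toks, if_neg hc, ih]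
      cases h : toks t with
      | nil => exact absurd h (toks_ne_nil t)
      | cons a r => simp [h]

theorem toks_snoc_char (c : Char) (hc : c ≠ ' ') : ∀ (l : List Char),
    ∀ (T : List (List Char)) (cur : List Char),
    toks l = T ++ [cur] → toks (l ++ [c]) = T ++ [cur ++ [c]] := by
  intro l
  induction l with
  | nil =>
    intro T cur h
    simp only [toks] at h
    cases T with
    | nil =>
      simp at h
      subst h
      simp [toks, if_neg hc]
    | cons T0 T1 =>
      simp at h
  | cons d t ih =>
    intro T cur h
    by_cases hd : d = ' '
    · subst hd
      simp only [toks, if_pos rfl] at h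
      cases T with
      | nil =>
        simp at h
        exact absurd h.2 (toks_ne_nil t)
      | cons T0 T1 =>
        simp at h
        obtain ⟨h0, h1⟩ := h
        simp only [List.cons_append, toks, if_pos rfl]
        rw [ih T1 cur h1, h0]
        simp
    · simp only [toks, if_neg hd] at h
      cases ht : toks t with
      | nil => exact absurd ht (toks_ne_nil t)
      | cons a r =>
        rw [ht] at h
        cases T with
        | nil =>
          simp at h
          obtain ⟨h0, h1⟩ := h
          have h2 : toks (t ++ [c]) = [] ++ [a ++ [c]] := ih [] a (by simp [ht, h1])
          simp only [List.cons_append, toks, if_neg hd, h2]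
          simp [← h0]
        | cons T0 T1 =>
          simp at h
          obtain ⟨h0, h1⟩ := h
          have h2 : toks (t ++ [c]) = (a :: T1) ++ [cur ++ [c]] := ih (a :: T1) cur (by simp [ht, h1])
          simp only [List.cons_append, toks, if_neg hd, h2]
          simp [h0]

theorem ofList_eq_empty_iff (l : List Char) : String.ofList l = "" ↔ l = [] := by
  constructor
  · intro h
    have := congrArg String.toList h
    simpa using this
  · intro h; subst h; rfl

theorem filter_map_ofList (L : List (List Char)) :
    (L.map String.ofList).filter (fun each => each ≠ "") =
      (L.filter (fun e => e ≠ [])).map String.ofList := by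
  induction L with
  | nil => rfl
  | cons a r ih =>
    simp only [List.map_cons, List.filter_cons]
    by_cases ha : a = []
    · subst ha
      rw [if_neg (by simp), if_neg (by simp), ih]
    · rw [if_pos (by simp [ofList_eq_empty_iff, ha]), if_pos (by simp [ha]), List.map_cons, ih]

theorem main_inv (xs : List Char) :
    ∀ (ns : String) (w : Int) (tokens : List String) (cur : List Char) (T : List (List Char)),
    toks ns.toList = T ++ [cur] →
    T.filter (fun e => e ≠ []) = tokens.map String.toList →
    (w = 0 ∨ (w = 1 ∧ cur = [])) →
    ∃ T',
      toks (xs.foldl sanitiseStep (ns, w)).1.toList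
        = T' ++ [(xs.foldl sanitiseAltStep (tokens, cur)).2] ∧
      T'.filter (fun e => e ≠ []) = (xs.foldl sanitiseAltStep (tokens, cur)).1.map String.toList ∧
      ((xs.foldl sanitiseStep (ns, w)).2 = 0 ∨
        ((xs.foldl sanitiseStep (ns, w)).2 = 1 ∧ (xs.foldl sanitiseAltStep (tokens, cur)).2 = [])) := by
  induction xs with
  | nil =>
    intro ns w tokens cur T h1 h2 h3
    exact ⟨T, h1, h2, h3⟩
  | cons c t ih =>
    intro ns w tokens cur T h1 h2 h3
    simp only [List.foldl_cons]
    by_cases hn : c = '\n'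
    · subst hn
      have hA : sanitiseStep (ns, w) '\n' = (ns.push ' ', w) := by
        simp [sanitiseStep]
      have hB : sanitiseAltStep (tokens, cur) '\n' =
          (if cur ≠ [] then tokens ++ [String.ofList cur] else tokens, []) := by
        by_cases hcur : cur = [] <;> simp [sanitiseAltStep, hcur]
      rw [hA, hB]
      have h2' : List.filter (fun e => !decide (e = [])) T = tokens.map String.toList := by
        simpa using h2
      apply ih
      · rw [String.toList_push, toks_snoc_space, h1]
      · by_cases hcur : cur = []
        · subst hcur; simp [List.filter_append, h2']
        · simp [List.filter_append, h2', hcur]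
      · rcases h3 with h | ⟨h, _⟩
        · exact Or.inl h
        · exact Or.inr ⟨h, rfl⟩
    · by_cases hs : c = ' '
      · subst hs
        have hB : sanitiseAltStep (tokens, cur) ' ' =
            (if cur ≠ [] then tokens ++ [String.ofList cur] else tokens, []) := by
          by_cases hcur : cur = [] <;> simp [sanitiseAltStep, hcur]
        rcases h3 with hw | ⟨hw, hcur⟩
        · subst hw
          have hA : sanitiseStep (ns, (0 : Int)) ' ' = (ns.push ' ', 1) := by
            simp [sanitiseStep]
          rw [hA, hB]
          have h2' : List.filter (fun e => !decide (e = [])) T = tokens.map String.toList := by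
            simpa using h2
          apply ih
          · rw [String.toList_push, toks_snoc_space, h1]
          · by_cases hcur : cur = []
            · subst hcur; simp [List.filter_append, h2']
            · simp [List.filter_append, h2', hcur]
          · exact Or.inr ⟨rfl, rfl⟩
        · subst hw; subst hcur
          have hA : sanitiseStep (ns, (1 : Int)) ' ' = (ns, 1) := by
            simp [sanitiseStep]
          rw [hA, hB]
          apply ih
          · simpa using h1
          · simpa using h2
          · exact Or.inr ⟨rfl, rfl⟩
      · have hA : sanitiseStep (ns, w) c = (ns.push c, 0) := by
          simp [sanitiseStep, hn, hs]
        have hB : sanitiseAltStep (tokens, cur) c = (tokens, cur ++ [c]) := by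
          simp [sanitiseAltStep, hn, hs]
        rw [hA, hB]
        apply ih
        · rw [String.toList_push]
          exact toks_snoc_char c hs ns.toList T cur h1
        · exact h2
        · exact Or.inl rfl

-- ===== VERDICT (by name: the statement is the Claim_ definition above) =====
theorem sanitise_spec : Claim_equal_sanitise := by
  intro string _
  unfold Spec_sanitise sanitise sanitise_alt
  obtain ⟨T', h1, h2, -⟩ := main_inv string.toList "" 0 [] [] []
    (by simp [toks]) (by simp) (Or.inl rfl)
  simp only [splitOn_eq_toks, filter_map_ofList, h1]
  rw [List.filter_append]
  have h2' : List.filter (fun e => !decide (e = [])) T'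
      = (string.toList.foldl sanitiseAltStep ([], [])).1.map String.toList := by
    simpa using h2
  by_cases hc : (string.toList.foldl sanitiseAltStep ([], [])).2 = []
  · simp [hc, h2', List.map_map, Function.comp_def]
  · simp [hc, h2', List.map_map, Function.comp_def]
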